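-- pv_equiv track=rewrite | github.com/davgav01/leetcode-solutions | 10_regular_expression_matching.py | next_special
-- ===== SOURCE A (Python) =====
-- def next_special(string):
--     i = 0
--     if "." not in string and "*" not in string:
--         return None, len(string)
--     while string[i] not in ".*":
--         i += 1
--     current = string[i]
--     if current == "." and i < len(string) - 1 and string[i + 1] == "*":
--         return ".*", i
--     return current, i
-- ===== SOURCE B (Python) =====
-- def next_special(string):
--     ans = (None, len(string))
--     prev = None
--     for i, c in reversed(list(enumerate(string))):
--         if c == '*':
--             ans = ('*', i)
--         elif c == '.':
--             ans = ('.*', i) if prev == '*' else ('.', i)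
--         prev = c
--     return ans
-- ===== Notes on version B (the rewrite author's own statement) =====
-- stated objective: alternative
-- what changed: Replaces the membership guard plus forward scan-and-peek while-loop with a single backwards fold over the enumerated string that maintains the best answer so far and the previously seen (i.e. next) character to detect the dot-followed-by-star adjacency.
import Mathlib
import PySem

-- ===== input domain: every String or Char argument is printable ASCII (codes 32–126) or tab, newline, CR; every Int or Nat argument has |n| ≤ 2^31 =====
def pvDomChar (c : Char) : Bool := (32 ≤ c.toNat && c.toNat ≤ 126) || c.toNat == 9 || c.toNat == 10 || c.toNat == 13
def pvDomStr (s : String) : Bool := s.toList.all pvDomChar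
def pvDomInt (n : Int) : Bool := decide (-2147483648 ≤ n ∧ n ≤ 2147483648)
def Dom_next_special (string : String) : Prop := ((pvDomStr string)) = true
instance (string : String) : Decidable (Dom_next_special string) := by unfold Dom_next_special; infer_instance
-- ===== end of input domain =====

-- B replaces A's membership guard + forward scan-and-peek loop with a single backwards fold over
-- the enumerated string keeping the best answer so far and the previously seen character (alternative decomposition, same cost).

-- ===== PORT A =====
-- while string[i] not in ".*": i += 1  (guard guarantees a special char exists; [] case unreachable)
def nsA_loop : List Char → Int → Char × Int
  | [], i => (' ', i)
  | c :: rest, i => if ¬ (c = '.' ∨ c = '*') then nsA_loop rest (i + 1) else (c, i)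

def next_special (string : String) : Option String × Int :=
  if PySem.Str.isIn "." string = false ∧ PySem.Str.isIn "*" string = false then
    (none, PySem.Str.len string)
  else
    let ci := nsA_loop string.toList 0
    if ci.1 = '.' ∧ ci.2 < PySem.Str.len string - 1 ∧ PySem.Str.pyGet? string (ci.2 + 1) = some '*' then
      (some ".*", ci.2)
    else
      (some (String.ofList [ci.1]), ci.2)

-- ===== PORT B =====
-- one step of the backwards for-loop: state = (ans, prev), item = (i, c)
def nsB_step (st : (Option String × Int) × Option Char) (p : Int × Char) :
    (Option String × Int) × Option Char :=
  ( if p.2 = '*' then (some "*", p.1)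
    else if p.2 = '.' then
      (if st.2 = some '*' then (some ".*", p.1) else (some ".", p.1))
    else st.1,
    some p.2 )

def next_special_alt (string : String) : Option String × Int :=
  (((PySem.List.enumerate string.toList).reverse).foldl nsB_step
    ((none, PySem.Str.len string), none)).1

-- ===== PRECONDITION & SPEC =====
def Spec_next_special (string : String) (out : Option String × Int) : Prop := out = next_special_alt string
instance (string : String) (out : Option String × Int) : Decidable (Spec_next_special string out) := by unfold Spec_next_special; infer_instance

-- ===== CLAIM (what is proved, stated in full; the proofs are below) =====
def Claim_equal_next_special : Prop := ∀ (string : String), Dom_next_special string → Spec_next_special string (next_special string)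

-- ===== LEMMAS AND PROOFS =====

-- reference recursion both ports are reduced to
def specR : List Char → Option String × Int
  | [] => (none, 0)
  | c :: t =>
    if c = '*' then (some "*", 0)
    else if c = '.' then (if t.head? = some '*' then (some ".*", 0) else (some ".", 0))
    else ((specR t).1, (specR t).2 + 1)

-- char-level version of port A
def Achars (l : List Char) : Option String × Int :=
  if PySem.Chars.isIn ['.'] l = false ∧ PySem.Chars.isIn ['*'] l = false then
    (none, (l.length : Int))
  else
    let ci := nsA_loop l 0
    if ci.1 = '.' ∧ ci.2 < (l.length : Int) - 1 ∧ PySem.List.pyGet? l (ci.2 + 1) = some '*' then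
      (some ".*", ci.2)
    else
      (some (String.ofList [ci.1]), ci.2)

theorem next_special_eq_Achars (s : String) : next_special s = Achars s.toList := by
  simp [next_special, Achars]

-- singleton infix is membership
theorem infix_singleton_iff_mem {d : Char} {l : List Char} : [d] <:+: l ↔ d ∈ l := by
  constructor
  · intro h; exact h.sublist.subset (by simp)
  · intro h
    obtain ⟨s, t, rfl⟩ := List.append_of_mem h
    exact ⟨s, t, by simp⟩

theorem isIn_singleton (d : Char) (l : List Char) :
    PySem.Chars.isIn [d] l = l.contains d := by
  by_cases h : d ∈ l
  · simp [(PySem.Chars.isIn_iff_infix [d] l).2 (infix_singleton_iff_mem.2 h), h]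
  · have : ¬ [d] <:+: l := fun hc => h (infix_singleton_iff_mem.1 hc)
    simp [(PySem.Chars.isIn_eq_false_iff [d] l).2 this, h]

theorem nsA_loop_shift (t : List Char) (i : Int) :
    nsA_loop t (i + 1) = ((nsA_loop t i).1, (nsA_loop t i).2 + 1) := by
  induction t generalizing i with
  | nil => simp [nsA_loop]
  | cons c rest ih =>
    by_cases hc : c = '.' ∨ c = '*'
    · simp [nsA_loop, hc]
    · simp [nsA_loop, hc, ih]

theorem nsA_loop_nonneg (t : List Char) (i : Int) (h : 0 ≤ i) : 0 ≤ (nsA_loop t i).2 := by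
  induction t generalizing i with
  | nil => simpa [nsA_loop]
  | cons c rest ih =>
    by_cases hc : c = '.' ∨ c = '*'
    · simpa [nsA_loop, hc]
    · simpa [nsA_loop, hc] using ih (i + 1) (by omega)

theorem pyGet?_cons_succ (c : Char) (t : List Char) (n : Int) (h : 0 ≤ n) :
    PySem.List.pyGet? (c :: t) (n + 1) = PySem.List.pyGet? t n := by
  obtain ⟨m, rfl⟩ := Int.eq_ofNat_of_zero_le h
  have h1 : ((m : Int) + 1) = ((m + 1 : Nat) : Int) := by push_cast; ring
  rw [h1, PySem.List.pyGet?_natCast, PySem.List.pyGet?_natCast]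
  simp

set_option maxHeartbeats 1000000 in
theorem Achars_shift (c : Char) (t : List Char) (hc : ¬ (c = '.' ∨ c = '*')) :
    Achars (c :: t) = ((Achars t).1, (Achars t).2 + 1) := by
  push_neg at hc
  obtain ⟨hd, hs⟩ := hc
  have h1 : PySem.Chars.isIn ['.'] (c :: t) = PySem.Chars.isIn ['.'] t := by
    simp [isIn_singleton]
    exact fun h => absurd h.symm hd
  have h2 : PySem.Chars.isIn ['*'] (c :: t) = PySem.Chars.isIn ['*'] t := by
    simp [isIn_singleton]
    exact fun h => absurd h.symm hs
  by_cases hn : PySem.Chars.isIn ['.'] t = false ∧ PySem.Chars.isIn ['*'] t = false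
  · simp only [Achars, h1, h2, if_pos hn]
    simp
  · have hloop : nsA_loop (c :: t) 0 = ((nsA_loop t 0).1, (nsA_loop t 0).2 + 1) := by
      have he : nsA_loop (c :: t) 0 = nsA_loop t 1 := by
        simp [nsA_loop, hd, hs]
      rw [he]
      simpa using nsA_loop_shift t 0
    have ha2 : 0 ≤ (nsA_loop t 0).2 := nsA_loop_nonneg t 0 le_rfl
    have hget : PySem.List.pyGet? (c :: t) ((nsA_loop t 0).2 + 1 + 1) =
        PySem.List.pyGet? t ((nsA_loop t 0).2 + 1) :=
      pyGet?_cons_succ c t _ (by omega)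
    have hlen : (((c :: t).length : Int)) = ((t.length : Int)) + 1 := by
      simp [List.length_cons]
    simp only [Achars, h1, h2, if_neg hn, hloop, hget, hlen]
    split_ifs with hA hB hB
    · rfl
    · exact absurd ⟨hA.1, by omega, hA.2.2⟩ hB
    · exact absurd ⟨hB.1, by omega, hB.2.2⟩ hA
    · rfl

theorem Achars_cons_dot (t : List Char) : Achars ('.' :: t) = specR ('.' :: t) := by
  cases t with
  | nil => decide
  | cons h t' =>
    have hA : ¬ (PySem.Chars.isIn ['.'] ('.' :: h :: t') = false ∧
        PySem.Chars.isIn ['*'] ('.' :: h :: t') = false) := by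
      rintro ⟨ha, _⟩
      rw [isIn_singleton] at ha; simp at ha
    have hloop : nsA_loop ('.' :: h :: t') 0 = ('.', 0) := by simp [nsA_loop]
    have hget : PySem.List.pyGet? ('.' :: h :: t') ((0 : Int) + 1) = some h := by
      have : ((0 : Int) + 1) = ((1 : Nat) : Int) := by norm_num
      rw [this, PySem.List.pyGet?_natCast]; rfl
    have hlen : (0 : Int) < ((('.' :: h :: t').length : Int)) - 1 := by
      simp [List.length_cons]
    by_cases hh : h = '*'
    · subst hh
      simp only [Achars, if_neg hA, hloop, specR]
      simp
    · have hg' : ¬ (PySem.List.pyGet? ('.' :: h :: t') ((0 : Int) + 1) = some '*') := by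
        rw [hget]; simpa using hh
      simp only [Achars, if_neg hA, hloop, specR]
      simp [hh]

theorem Achars_cons_star (t : List Char) : Achars ('*' :: t) = specR ('*' :: t) := by
  have hA : ¬ (PySem.Chars.isIn ['.'] ('*' :: t) = false ∧
      PySem.Chars.isIn ['*'] ('*' :: t) = false) := by
    rintro ⟨_, hb⟩
    rw [isIn_singleton] at hb; simp at hb
  have hloop : nsA_loop ('*' :: t) 0 = ('*', 0) := by simp [nsA_loop]
  have hne : ¬ (('*' : Char) = '.') := by decide
  simp only [Achars, if_neg hA, hloop, specR]
  simp [hne]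

theorem Achars_eq_specR (l : List Char) : Achars l = specR l := by
  induction l with
  | nil => decide
  | cons c t ih =>
    by_cases hc : c = '.' ∨ c = '*'
    · rcases hc with rfl | rfl
      · exact Achars_cons_dot t
      · exact Achars_cons_star t
    · rw [Achars_shift c t hc, ih]
      push_neg at hc
      simp [specR, hc.1, hc.2]

-- when specR finds nothing, its index is the length
theorem specR_none (l : List Char) (h : (specR l).1 = none) : (specR l).2 = (l.length : Int) := by
  induction l with
  | nil => simp [specR]
  | cons c t ih =>
    by_cases h1 : c = '*'
    · simp [specR, h1] at h
    · by_cases h2 : c = '.'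
      · by_cases h3 : t.head? = some '*' <;> simp [specR, h2, h3] at h
      · simp only [specR, if_neg h1, if_neg h2] at h ⊢
        rw [ih h]
        simp [List.length_cons]

-- the backwards fold computes specR (shifted by the start index), keeping ans0 when nothing is found
theorem nsB_fold (l : List Char) (k : Int) (ans0 : Option String × Int) :
    List.foldl nsB_step (ans0, (none : Option Char)) ((PySem.List.enumerate l k).reverse)
      = ((if (specR l).1 = none then ans0 else ((specR l).1, (specR l).2 + k)), l.head?) := by
  induction l generalizing k ans0 with
  | nil => simp [PySem.List.enumerate_nil, specR]
  | cons c t ih =>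
    rw [PySem.List.enumerate_cons]
    rw [List.reverse_cons, List.foldl_append, ih]
    by_cases h1 : c = '*'
    · simp [nsB_step, specR, h1]
    · by_cases h2 : c = '.'
      · by_cases h3 : t.head? = some '*' <;>
          simp [nsB_step, specR, h2, h3]
      · by_cases h4 : (specR t).1 = none
        · simp [nsB_step, specR, h1, h2, h4]
        · simp [nsB_step, specR, h1, h2, h4]
          ring

theorem next_special_alt_eq_specR (s : String) : next_special_alt s = specR s.toList := by
  unfold next_special_alt
  rw [nsB_fold]
  by_cases h : (specR s.toList).1 = none
  · rw [if_pos h]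
    have h2 := specR_none s.toList h
    rw [Prod.ext_iff]
    exact ⟨h.symm, by rw [h2]; simp [PySem.Str.len_eq]⟩
  · rw [if_neg h]
    simp

-- ===== VERDICT (by name: the statement is the Claim_ definition above) =====
theorem next_special_spec : Claim_equal_next_special := by
  intro s _
  unfold Spec_next_special
  rw [next_special_eq_Achars, next_special_alt_eq_specR, Achars_eq_specR]
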